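-- pv_equiv track=rewrite | github.com/RedMadKnight/D3CPKUnpack | d3cpk_extractor_v7.py | read_bits_be
-- ===== SOURCE A (Python) =====
-- def read_bits_be(buf, bit_pos, bit_count):
--     """Read bits MSB-first within each byte.
--
--     This is the SAME function used for both BE (PS3/Xbox 360) and LE (Switch)
--     CPKs. Empirical testing showed that the Switch port kept the PowerPC-era
--     bit-packer intact: word-level values (magic, sizes, offsets) are
--     little-endian on Switch, but the bit-stream in SFI / Locations /
--     CompSectorToDecomp tables still goes MSB-first within each byte.
--     """
--     result = 0
--     for i in range(bit_count):
--         pos = bit_pos + i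
--         byte_pos = pos >> 3
--         byte_bit = 7 - (pos & 7)
--         result = (result << 1) | (1 if buf[byte_pos] & (1 << byte_bit) else 0)
--     return result
-- ===== SOURCE B (Python) =====
-- def read_bits_be(buf, bit_pos, bit_count):
--     """Read bit_count bits MSB-first starting at bit_pos.
--
--     Byte-level rewrite: accumulate the touched bytes into one integer,
--     then extract the field with a single shift and mask.
--     """
--     if bit_count <= 0:
--         return 0
--     last_pos = bit_pos + bit_count - 1
--     value = 0
--     for b in range(bit_pos >> 3, (last_pos >> 3) + 1):
--         value = (value << 8) | (buf[b] & 0xFF)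
--     return (value >> (7 - (last_pos & 7))) & ((1 << bit_count) - 1)
-- ===== Notes on version B (the rewrite author's own statement) =====
-- stated objective: faster
-- what changed: Instead of looping once per bit and testing each bit individually, B concatenates the touched bytes into one integer in a single per-byte loop and extracts the field with one shift and one mask.
import Mathlib
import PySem

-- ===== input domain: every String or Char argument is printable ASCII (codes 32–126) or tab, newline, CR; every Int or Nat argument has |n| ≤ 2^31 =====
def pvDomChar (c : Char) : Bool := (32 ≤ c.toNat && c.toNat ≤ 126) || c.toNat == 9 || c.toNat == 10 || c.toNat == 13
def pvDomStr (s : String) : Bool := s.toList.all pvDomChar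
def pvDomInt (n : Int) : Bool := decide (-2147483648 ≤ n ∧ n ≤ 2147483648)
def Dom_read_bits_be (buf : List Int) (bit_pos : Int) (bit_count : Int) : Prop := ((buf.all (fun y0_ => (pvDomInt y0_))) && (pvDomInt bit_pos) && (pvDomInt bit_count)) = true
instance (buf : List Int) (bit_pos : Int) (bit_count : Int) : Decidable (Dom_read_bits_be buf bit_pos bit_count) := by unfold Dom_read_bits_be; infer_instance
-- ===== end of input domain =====

-- B replaces A's one-test-per-bit loop by one per-byte accumulation plus a single shift-and-mask extraction.

-- ===== PORT A =====
-- literal port of A's per-bit loop; buf[byte_pos] is total pyGetD here because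
-- Pre_ excludes exactly the out-of-range accesses (Python IndexError)
def read_bits_be (buf : List Int) (bit_pos : Int) (bit_count : Int) : Int :=
  (PySem.List.pyRange 0 bit_count 1).foldl
    (fun result i =>
      let pos := bit_pos + i
      let byte_pos := pos >>> (3 : Nat)
      let byte_bit := 7 - PySem.Int.band pos 7
      -- byte_bit ∈ [0,7], so .toNat is exact (Python shift counts are nonnegative here)
      PySem.Int.bor (result <<< (1 : Nat))
        (if PySem.Int.band (PySem.List.pyGetD buf byte_pos 0) ((1 : Int) <<< byte_bit.toNat) ≠ 0 then 1 else 0))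
    0

-- ===== PORT B =====
-- literal port of Source B: early return for bit_count ≤ 0, per-byte accumulation, shift + mask
def read_bits_be_alt (buf : List Int) (bit_pos : Int) (bit_count : Int) : Int :=
  if bit_count ≤ 0 then 0
  else
    let last_pos := bit_pos + bit_count - 1
    let value := (PySem.List.pyRange (bit_pos >>> (3 : Nat)) ((last_pos >>> (3 : Nat)) + 1) 1).foldl
      (fun v b => PySem.Int.bor (v <<< (8 : Nat)) (PySem.Int.band (PySem.List.pyGetD buf b 0) 255)) 0
    -- the shift count 7 - (last_pos & 7) ∈ [0,7] and the mask exponent bit_count are nonnegative: .toNat is exact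
    PySem.Int.band (value >>> (7 - PySem.Int.band last_pos 7).toNat) (((1 : Int) <<< bit_count.toNat) - 1)

-- ===== PRECONDITION & SPEC =====
-- Pre_ excludes exactly the inputs where Python's buf[byte_pos] raises IndexError:
-- some touched byte index (they form the interval [bit_pos>>3, (bit_pos+bit_count-1)>>3]) is out of range.
def Pre_read_bits_be (buf : List Int) (bit_pos : Int) (bit_count : Int) : Prop :=
  0 < bit_count →
    (PySem.Raise.InRange buf.length (PySem.Int.floordiv bit_pos 8) ∧
     PySem.Raise.InRange buf.length (PySem.Int.floordiv (bit_pos + bit_count - 1) 8))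
instance (buf : List Int) (bit_pos : Int) (bit_count : Int) : Decidable (Pre_read_bits_be buf bit_pos bit_count) := by unfold Pre_read_bits_be; infer_instance

def pvWitness_read_bits_be : List Int × Int × Int := ([170, 85, 255], 4, 8)

def Spec_read_bits_be (buf : List Int) (bit_pos : Int) (bit_count : Int) (out : Int) : Prop := out = read_bits_be_alt buf bit_pos bit_count
instance (buf : List Int) (bit_pos : Int) (bit_count : Int) (out : Int) : Decidable (Spec_read_bits_be buf bit_pos bit_count out) := by unfold Spec_read_bits_be; infer_instance

-- ===== CLAIM (what is proved, stated in full; the proofs are below) =====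
def Claim_equal_read_bits_be : Prop := ∀ (buf : List Int) (bit_pos : Int) (bit_count : Int), Dom_read_bits_be buf bit_pos bit_count → Pre_read_bits_be buf bit_pos bit_count → Spec_read_bits_be buf bit_pos bit_count (read_bits_be buf bit_pos bit_count)

-- ===== LEMMAS AND PROOFS =====

theorem pv_two_pow_toNat (k : Nat) : ((2:Int) ^ k).toNat = 2 ^ k := by
  have : ((2:Int) ^ k) = ((2 ^ k : Nat) : Int) := by push_cast; ring
  rw [this, Int.toNat_natCast]

theorem pv_cast_dm (m k : Nat) : ((m / 2 ^ k % 2 : Nat) : Int) = (m : Int) / 2 ^ k % 2 := by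
  rw [Int.natCast_mod, Int.natCast_div]; push_cast; ring_nf

theorem pv_band_two_pow (a : Int) (k : Nat) :
    PySem.Int.band a (2 ^ k) = (a / 2 ^ k % 2) * 2 ^ k := by
  unfold PySem.Int.band
  have hP : (0:Int) < 2 ^ k := by positivity
  by_cases ha : 0 ≤ a
  · simp only [ha, if_true, le_of_lt hP, if_true]
    rw [pv_two_pow_toNat, Nat.and_two_pow, Nat.testBit_eq_decide_div_mod_eq]
    obtain ⟨m, rfl⟩ : ∃ m : Nat, a = (m : Int) := ⟨a.toNat, (Int.toNat_of_nonneg ha).symm⟩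
    rw [Int.toNat_natCast, ← pv_cast_dm]
    rcases Nat.mod_two_eq_zero_or_one (m / 2 ^ k) with h | h <;> simp [h]
  · simp only [ha, if_false, le_of_lt hP, if_true]
    rw [pv_two_pow_toNat]
    obtain ⟨m, ham⟩ : ∃ m : Nat, a = -(m : Int) - 1 := ⟨(-a - 1).toNat, by omega⟩
    have hma : (-a - 1).toNat = m := by omega
    rw [hma]
    rw [Nat.and_comm, Nat.and_two_pow, Nat.testBit_eq_decide_div_mod_eq]
    have h0 : (0:Int) ≤ ((m % 2 ^ k : Nat) : Int) := by positivity
    have hmod : ((m % 2 ^ k : Nat) : Int) < 2 ^ k := by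
      have := Nat.mod_lt m (show 0 < 2 ^ k by positivity); exact_mod_cast this
    have hsplit : ((m / 2 ^ k : Nat) : Int) * 2 ^ k + ((m % 2 ^ k : Nat) : Int) = (m:Int) := by
      have hn := Nat.div_add_mod m (2 ^ k)
      have hc : ((2 ^ k * (m / 2 ^ k) + m % 2 ^ k : Nat) : Int) = (m : Int) := by
        exact_mod_cast congrArg (fun x : Nat => (x : Int)) hn
      rw [Nat.cast_add, Nat.cast_mul] at hc
      push_cast [Nat.cast_pow] at hc ⊢
      linarith [hc]
    have hdiv : a / 2 ^ k = -((m / 2 ^ k : Nat) : Int) - 1 :=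
      ((Int.ediv_emod_unique (r := 2 ^ k - 1 - ((m % 2 ^ k : Nat) : Int)) hP).mpr
        ⟨by rw [ham]; linear_combination (-1 : Int) * hsplit, by omega, by omega⟩).1
    rw [hdiv]
    have hc : ((m / 2 ^ k % 2 : Nat) : Int) = ((m / 2 ^ k : Nat) : Int) % 2 := by push_cast; ring
    have h2 : (-((m / 2 ^ k : Nat) : Int) - 1) % 2 = 1 - ((m / 2 ^ k % 2 : Nat) : Int) := by
      rw [hc]; omega
    rw [h2]
    rcases Nat.mod_two_eq_zero_or_one (m / 2 ^ k) with h | h <;> simp [h]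

theorem pv_band_mask (a : Int) (k : Nat) :
    PySem.Int.band a (2 ^ k - 1) = a % 2 ^ k := by
  unfold PySem.Int.band
  have hP : (0:Int) < 2 ^ k := by positivity
  have hb : (0:Int) ≤ 2 ^ k - 1 := by omega
  have hbn : ((2:Int) ^ k - 1).toNat = 2 ^ k - 1 := by
    have : ((2:Int) ^ k) = ((2 ^ k : Nat) : Int) := by push_cast; ring
    omega
  by_cases ha : 0 ≤ a
  · simp only [ha, if_true, hb, if_true]
    rw [hbn, Nat.and_two_pow_sub_one_eq_mod]
    obtain ⟨m, rfl⟩ : ∃ m : Nat, a = (m : Int) := ⟨a.toNat, (Int.toNat_of_nonneg ha).symm⟩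
    rw [Int.toNat_natCast, Int.natCast_mod]
    push_cast; ring
  · simp only [ha, if_false, hb, if_true]
    rw [hbn]
    obtain ⟨m, ham⟩ : ∃ m : Nat, a = -(m : Int) - 1 := ⟨(-a - 1).toNat, by omega⟩
    have hma : (-a - 1).toNat = m := by omega
    rw [hma, Nat.and_comm, Nat.and_two_pow_sub_one_eq_mod]
    have h0 : (0:Int) ≤ ((m % 2 ^ k : Nat) : Int) := by positivity
    have hmod : ((m % 2 ^ k : Nat) : Int) < 2 ^ k := by
      exact_mod_cast Nat.mod_lt m (show 0 < 2 ^ k by positivity)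
    have hsplit : ((m / 2 ^ k : Nat) : Int) * 2 ^ k + ((m % 2 ^ k : Nat) : Int) = (m:Int) := by
      have hn := Nat.div_add_mod m (2 ^ k)
      have hc : ((2 ^ k * (m / 2 ^ k) + m % 2 ^ k : Nat) : Int) = (m : Int) := by
        exact_mod_cast congrArg (fun x : Nat => (x : Int)) hn
      rw [Nat.cast_add, Nat.cast_mul] at hc
      push_cast [Nat.cast_pow] at hc ⊢
      linarith [hc]
    have hemod : a % 2 ^ k = 2 ^ k - 1 - ((m % 2 ^ k : Nat) : Int) :=
      ((Int.ediv_emod_unique (q := -((m / 2 ^ k : Nat) : Int) - 1) hP).mpr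
        ⟨by rw [ham]; linear_combination (-1 : Int) * hsplit, by omega, by omega⟩).2
    have hn2 : ((2 ^ k - 1 - m % 2 ^ k : Nat) : Int) = 2 ^ k - 1 - ((m % 2 ^ k : Nat) : Int) := by
      have hk : m % 2 ^ k < 2 ^ k := Nat.mod_lt m (by positivity)
      have : ((2 ^ k : Nat) : Int) = 2 ^ k := by push_cast; ring
      omega
    rw [hemod, hn2]

theorem pv_or_add (x y : Int) (k : Nat) (hx : 0 ≤ x) (hy0 : 0 ≤ y) (hy : y < 2 ^ k) :
    PySem.Int.bor (x <<< k) y = x * 2 ^ k + y := by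
  rw [Int.shiftLeft_eq]
  have hxk : (0:Int) ≤ x * 2 ^ k := by positivity
  rw [PySem.Int.bor_of_nonneg hxk hy0]
  have hxt : (x * 2 ^ k).toNat = x.toNat * 2 ^ k := by
    have h2 : ((x.toNat * 2 ^ k : Nat) : Int) = x * 2 ^ k := by
      push_cast [Int.toNat_of_nonneg hx]; ring
    rw [← h2, Int.toNat_natCast]
  have hyt : y.toNat < 2 ^ k := by
    have : ((2:Int) ^ k) = ((2 ^ k : Nat) : Int) := by push_cast; ring
    omega
  have hor := Nat.shiftLeft_add_eq_or_of_lt (a := x.toNat) hyt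
  rw [hxt, ← Nat.shiftLeft_eq, ← hor]
  push_cast [Nat.shiftLeft_eq, Int.toNat_of_nonneg hx, Int.toNat_of_nonneg hy0]
  ring

theorem pv_split (w : Int) (n : Nat) :
    w % 2 ^ (n + 1) = 2 * (w / 2 % 2 ^ n) + w % 2 := by
  have hP : (0:Int) < 2 ^ n := by positivity
  have h1 : 0 ≤ w / 2 % 2 ^ n := Int.emod_nonneg _ (by positivity)
  have h2 : w / 2 % 2 ^ n < 2 ^ n := Int.emod_lt_of_pos _ hP
  have hw : w = 2 * (w / 2) + w % 2 := by omega
  have hu : w / 2 = 2 ^ n * (w / 2 / 2 ^ n) + w / 2 % 2 ^ n := by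
    rw [Int.mul_ediv_add_emod]
  calc w % 2 ^ (n + 1)
      = (2 * (w / 2 % 2 ^ n) + w % 2 + (w / 2 / 2 ^ n) * 2 ^ (n + 1)) % 2 ^ (n + 1) := by
        congr 1; rw [pow_succ]; linear_combination hw + 2 * hu
    _ = (2 * (w / 2 % 2 ^ n) + w % 2) % 2 ^ (n + 1) := by simp
    _ = 2 * (w / 2 % 2 ^ n) + w % 2 := by
        apply Int.emod_eq_of_lt (by omega)
        rw [pow_succ]; omega

theorem pv_byte (x : Int) (k : Nat) (hk : k < 8) :
    x / 2 ^ k % 2 = x % 256 / 2 ^ k % 2 := by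
  have hsplit : x = x % 256 + (x / 256 * 2 ^ (8 - k)) * 2 ^ k := by
    have : (2:Int) ^ (8 - k) * 2 ^ k = 256 := by
      have h8 : 8 - k + k = 8 := by omega
      rw [← pow_add, h8]; norm_num
    rw [mul_assoc, this]
    omega
  conv_lhs => rw [hsplit]
  rw [Int.add_mul_ediv_right _ _ (by positivity : (2:Int) ^ k ≠ 0)]
  have : (2:Int) ^ (8 - k) = 2 * 2 ^ (7 - k) := by
    have h7 : 8 - k = (7 - k) + 1 := by omega
    rw [h7, pow_succ]; ring
  rw [this]
  have : x % 256 / 2 ^ k + x / 256 * (2 * 2 ^ (7 - k)) =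
      x % 256 / 2 ^ k + (x / 256 * 2 ^ (7 - k)) * 2 := by ring
  rw [this]; simp

def pvBit (buf : List Int) (p : Int) : Int :=
  PySem.List.pyGetD buf (p / 8) 0 / 2 ^ (7 - p % 8).toNat % 2

def pvA (buf : List Int) (bp : Int) (n : Nat) : Int :=
  (List.range n).foldl (fun r (k : Nat) => 2 * r + pvBit buf (bp + ↑k)) 0

def pvV (buf : List Int) (a b : Int) : Int :=
  (PySem.List.pyRange a b 1).foldl (fun v i => 256 * v + PySem.List.pyGetD buf i 0 % 256) 0

theorem pv_band7 (p : Int) : PySem.Int.band p 7 = p % 8 := by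
  have h := pv_band_mask p 3
  norm_num at h
  exact h

theorem pv_band255 (x : Int) : PySem.Int.band x 255 = x % 256 := by
  have h := pv_band_mask x 8
  norm_num at h
  exact h

theorem pv_shift3 (p : Int) : p >>> (3 : Nat) = p / 8 := by
  have h := Int.shiftRight_eq_div_pow p 3
  norm_num at h
  exact h

theorem pv_one_shl (t : Nat) : (1 : Int) <<< t = 2 ^ t := by
  rw [Int.shiftLeft_eq]; ring

theorem pv_bit01 (buf : List Int) (p : Int) : pvBit buf p = 0 ∨ pvBit buf p = 1 :=
  Int.emod_two_eq _

theorem pv_bit_nonneg (buf : List Int) (p : Int) : 0 ≤ pvBit buf p := by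
  rcases pv_bit01 buf p with h | h <;> omega

theorem pv_cond (buf : List Int) (p : Int) :
    (if PySem.Int.band (PySem.List.pyGetD buf (p >>> (3:Nat)) 0)
        ((1 : Int) <<< (7 - PySem.Int.band p 7).toNat) ≠ 0 then (1:Int) else 0) = pvBit buf p := by
  rw [pv_shift3, pv_band7, pv_one_shl, pv_band_two_pow]
  have hP : (0:Int) < 2 ^ (7 - p % 8).toNat := by positivity
  unfold pvBit
  rcases Int.emod_two_eq (PySem.List.pyGetD buf (p / 8) 0 / 2 ^ (7 - p % 8).toNat) with h | h <;>
    rw [h] <;> simp [hP.ne']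

theorem pvA_succ (buf : List Int) (bp : Int) (n : Nat) :
    pvA buf bp (n + 1) = 2 * pvA buf bp n + pvBit buf (bp + n) := by
  unfold pvA
  rw [List.range_succ, List.foldl_append, List.foldl_cons, List.foldl_nil]

theorem pvA_nonneg (buf : List Int) (bp : Int) (n : Nat) : 0 ≤ pvA buf bp n := by
  induction n with
  | zero => simp [pvA]
  | succ n ih =>
    rw [pvA_succ]
    have := pv_bit_nonneg buf (bp + n)
    omega

theorem pv_portA_aux (buf : List Int) (bp : Int) (n : Nat) :
    (List.range n).foldl (fun result (k : Nat) =>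
      PySem.Int.bor (result <<< (1:Nat))
        (if PySem.Int.band (PySem.List.pyGetD buf ((bp + ↑k) >>> (3:Nat)) 0)
            ((1:Int) <<< (7 - PySem.Int.band (bp + ↑k) 7).toNat) ≠ 0 then 1 else 0)) 0
      = pvA buf bp n := by
  induction n with
  | zero => simp [pvA]
  | succ n ih =>
    rw [List.range_succ, List.foldl_append, List.foldl_cons, List.foldl_nil, ih, pvA_succ]
    rw [pv_cond buf (bp + ↑n)]
    rcases pv_bit01 buf (bp + n) with h | h <;>
      rw [pv_or_add _ _ 1 (pvA_nonneg buf bp n) (by omega) (by omega)] <;> ring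

theorem pv_portA (buf : List Int) (bp bc : Int) :
    read_bits_be buf bp bc = pvA buf bp bc.toNat := by
  unfold read_bits_be
  rw [PySem.List.pyRange_one, List.foldl_map]
  simp only [zero_add, Int.sub_zero]
  exact pv_portA_aux buf bp bc.toNat

theorem pv_foldV_aux (buf : List Int) (l : List Int) :
    ∀ v : Int, 0 ≤ v →
      0 ≤ l.foldl (fun v i => 256 * v + PySem.List.pyGetD buf i 0 % 256) v ∧
      l.foldl (fun v b => PySem.Int.bor (v <<< (8:Nat)) (PySem.Int.band (PySem.List.pyGetD buf b 0) 255)) v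
        = l.foldl (fun v i => 256 * v + PySem.List.pyGetD buf i 0 % 256) v := by
  induction l with
  | nil => intro v hv; exact ⟨hv, rfl⟩
  | cons b l ih =>
    intro v hv
    have h0 : 0 ≤ PySem.List.pyGetD buf b 0 % 256 := Int.emod_nonneg _ (by norm_num)
    have h1 : PySem.List.pyGetD buf b 0 % 256 < 256 := Int.emod_lt_of_pos _ (by norm_num)
    have hv' : 0 ≤ 256 * v + PySem.List.pyGetD buf b 0 % 256 := by omega
    rw [List.foldl_cons, List.foldl_cons]
    rw [pv_band255, pv_or_add _ _ 8 hv h0 (by norm_num at h1 ⊢; omega)]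
    have : v * 2 ^ 8 + PySem.List.pyGetD buf b 0 % 256 = 256 * v + PySem.List.pyGetD buf b 0 % 256 := by
      norm_num; ring
    rw [this]
    exact ih _ hv'

theorem pvV_succ (buf : List Int) (a b : Int) (h : a ≤ b) :
    pvV buf a (b + 1) = 256 * pvV buf a b + PySem.List.pyGetD buf b 0 % 256 := by
  unfold pvV
  rw [PySem.List.pyRange_one_succ_right h, List.foldl_append, List.foldl_cons, List.foldl_nil]

theorem pvV_single (buf : List Int) (a : Int) :
    pvV buf a (a + 1) = PySem.List.pyGetD buf a 0 % 256 := by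
  rw [pvV_succ buf a a le_rfl]
  have : pvV buf a a = 0 := by
    unfold pvV
    rw [PySem.List.pyRange_one]
    simp
  rw [this]; ring

theorem pvV_mod (buf : List Int) (a b : Int) (h : a ≤ b) :
    pvV buf a (b + 1) % 256 = PySem.List.pyGetD buf b 0 % 256 := by
  rw [pvV_succ buf a b h]
  omega

theorem pv_portB (buf : List Int) (bp bc : Int) (h : 0 < bc) :
    read_bits_be_alt buf bp bc =
      pvV buf (bp / 8) ((bp + bc - 1) / 8 + 1) / 2 ^ (7 - (bp + bc - 1) % 8).toNat % 2 ^ bc.toNat := by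
  unfold read_bits_be_alt
  rw [if_neg (by omega)]
  simp only [pv_shift3, pv_band7]
  rw [(pv_foldV_aux buf _ 0 le_rfl).2]
  rw [Int.shiftRight_eq_div_pow, pv_one_shl, pv_band_mask]
  have hc : ((2 ^ (7 - (bp + bc - 1) % 8).toNat : Nat) : Int) = 2 ^ (7 - (bp + bc - 1) % 8).toNat := by
    push_cast; ring
  rw [hc]
  rfl

theorem pv_ediv_pow (a : Int) (m : Nat) : a / 2 ^ m / 2 = a / 2 ^ (m + 1) := by
  rw [Int.ediv_ediv_of_nonneg (by positivity), ← pow_succ]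

theorem pv_main (buf : List Int) (bp : Int) (n : Nat) (h : 1 ≤ n) :
    pvA buf bp n =
      pvV buf (bp / 8) ((bp + n - 1) / 8 + 1) / 2 ^ (7 - (bp + n - 1) % 8).toNat % 2 ^ n := by
  induction n, h using Nat.le_induction with
  | base =>
    have hj : (7 - (bp + (1:Nat) - 1) % 8).toNat < 8 := by omega
    have hs : (bp + (1:Nat) - 1) = bp := by push_cast; ring
    rw [hs] at hj ⊢
    rw [pvV_single, pow_one, ← pv_byte _ _ hj]
    unfold pvA pvBit
    simp
  | succ n hn ih =>
    have hcast : (bp + (↑(n + 1) : Int) - 1) = (bp + ↑n - 1) + 1 := by push_cast; ring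
    rw [hcast]
    set s : Int := bp + ↑n - 1 with hsdef
    have hbpn : bp + (↑n : Int) = s + 1 := by omega
    rw [pvA_succ, ih, hbpn]
    by_cases hr : (s + 1) % 8 = 0
    · -- the new bit starts a fresh byte
      have hq' : (s + 1) / 8 = s / 8 + 1 := by omega
      have hj0 : (7 - s % 8).toNat = 0 := by omega
      have hj7 : (7 - (s + 1) % 8).toNat = 7 := by omega
      have hle : bp / 8 ≤ s / 8 + 1 := by omega
      rw [hq', hj0, hj7, pvV_succ buf _ _ hle]
      set V : Int := pvV buf (bp / 8) (s / 8 + 1) with hV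
      set y : Int := PySem.List.pyGetD buf (s / 8 + 1) 0 % 256 with hy
      have hy0 : 0 ≤ y := Int.emod_nonneg _ (by norm_num)
      have hy1 : y < 256 := Int.emod_lt_of_pos _ (by norm_num)
      have hdiv : (256 * V + y) / 2 ^ 7 = 2 * V + y / 128 := by
        have h7 : (2:Int) ^ 7 = 128 := by norm_num
        have hsum : 256 * V + y = y + (2 * V) * 128 := by ring
        rw [h7, hsum, Int.add_mul_ediv_right _ _ (by norm_num : (128:Int) ≠ 0)]
        ring
      rw [hdiv]
      set b : Int := y / 128 with hb
      have hb01 : b = 0 ∨ b = 1 := by omega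
      have hw := pv_split (2 * V + b) n
      have hw2 : (2 * V + b) / 2 = V := by omega
      have hwm : (2 * V + b) % 2 = b := by omega
      rw [hw2, hwm] at hw
      rw [hw]
      have hbit : pvBit buf (s + 1) = b := by
        unfold pvBit
        rw [hq', hj7, pv_byte _ 7 (by norm_num)]
        have : PySem.List.pyGetD buf (s / 8 + 1) 0 % 256 = y := rfl
        rw [this]
        norm_num
        omega
      rw [hbit]
      norm_num
    · -- same byte: the shift shrinks by one
      have hq' : (s + 1) / 8 = s / 8 := by omega
      have hjj : (7 - s % 8).toNat = (7 - (s + 1) % 8).toNat + 1 := by omega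
      have hj8 : (7 - (s + 1) % 8).toNat < 8 := by omega
      rw [hq']
      set V : Int := pvV buf (bp / 8) (s / 8 + 1) with hV
      set j : Nat := (7 - (s + 1) % 8).toNat with hj
      have hw := pv_split (V / 2 ^ j) n
      rw [pv_ediv_pow, ← hjj] at hw
      rw [hw]
      have hle : bp / 8 ≤ s / 8 := by omega
      have hbit : pvBit buf (s + 1) = V / 2 ^ j % 2 := by
        unfold pvBit
        rw [hq', ← hj, pv_byte _ j hj8, ← pvV_mod buf _ _ hle, ← hV, ← pv_byte _ j hj8]
      rw [hbit]

-- ===== VERDICT (by name: the statement is the Claim_ definition above) =====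
theorem read_bits_be_spec : Claim_equal_read_bits_be := by
  intro buf bp bc _ _
  unfold Spec_read_bits_be
  by_cases h : bc ≤ 0
  · rw [pv_portA]
    have h0 : bc.toNat = 0 := by omega
    simp [read_bits_be_alt, h, h0, pvA]
  · rw [pv_portA, pv_portB buf bp bc (by omega), pv_main buf bp bc.toNat (by omega)]
    have : (bp + (bc.toNat : Int) - 1) = bp + bc - 1 := by omega
    rw [this]
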